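-- pv_equiv track=rewrite | github.com/Cyrille2912/Chips | net_coordinates.py | net_coordinates
-- ===== SOURCE A (Python) =====
-- def net_coordinates(gates, nets):
--     """
--     Links the gate coordinates with the gates's
--     number in the net list. Returns a list a tuples with,
--     in each tuple, the start coordinates and the end coordinates
--     of each net.
--     """
--     gate_coordinates_from = []
--     gate_coordinates_to = []
--
--     for connections in nets:
--             for coordinates in gates:
--                     if connections[0] == coordinates[0]:
--                             gate_coordinates_from.append(coordinates[1:])
--                     if connections[1] == coordinates[0]:
--                             gate_coordinates_to.append(coordinates[1:])
--
--     return zip(gate_coordinates_from, gate_coordinates_to)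
-- ===== SOURCE B (Python) =====
-- def net_coordinates(gates, nets):
--     """Index gates by gate number once, then look nets up in the index."""
--     index = {}
--     for gate in gates:
--         index[gate[0]] = index.get(gate[0], []) + [gate[1:]]
--     gate_coordinates_from = []
--     gate_coordinates_to = []
--     for connections in nets:
--         gate_coordinates_from += index.get(connections[0], [])
--         gate_coordinates_to += index.get(connections[1], [])
--     return zip(gate_coordinates_from, gate_coordinates_to)
-- ===== Notes on version B (the rewrite author's own statement) =====
-- stated objective: faster
-- what changed: B builds a dict index from gate number to the list of that gate's coordinate tails in one pass over gates, then each net endpoint is a single index lookup instead of A's per-net scan over all gates.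
-- outside the precondition, e.g. on net_coordinates([[]], []): A returns [], B raises IndexError; on net_coordinates([], [[]]): A returns [], B raises IndexError
import Mathlib
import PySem

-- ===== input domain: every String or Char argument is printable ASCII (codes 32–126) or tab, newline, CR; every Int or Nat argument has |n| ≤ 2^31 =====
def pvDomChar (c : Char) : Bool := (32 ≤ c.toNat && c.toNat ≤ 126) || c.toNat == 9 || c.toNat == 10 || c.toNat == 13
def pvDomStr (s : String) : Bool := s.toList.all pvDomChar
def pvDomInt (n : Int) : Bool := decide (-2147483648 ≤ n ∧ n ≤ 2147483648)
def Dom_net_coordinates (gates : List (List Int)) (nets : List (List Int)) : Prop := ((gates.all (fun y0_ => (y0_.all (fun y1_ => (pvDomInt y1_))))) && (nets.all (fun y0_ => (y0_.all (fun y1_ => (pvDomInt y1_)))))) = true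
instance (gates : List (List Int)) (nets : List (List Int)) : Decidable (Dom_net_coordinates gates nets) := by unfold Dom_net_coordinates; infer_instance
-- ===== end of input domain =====

-- B replaces A's per-net inner scan over all gates with a dict index built once (gate number -> list of coordinate tails): faster by a better data structure.


-- ===== PORT A =====
-- Literal port: for each net, scan all gates, appending matching tails to the two lists; zip at the end.
def net_coordinates (gates : List (List Int)) (nets : List (List Int)) : List (List Int × List Int) :=
  let acc := nets.foldl (fun acc conn =>
    gates.foldl (fun acc2 coord =>
      let acc2 := if PySem.List.pyGetD conn 0 0 = PySem.List.pyGetD coord 0 0 then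
          (acc2.1 ++ [PySem.List.slice coord (some 1) none], acc2.2) else acc2
      if PySem.List.pyGetD conn 1 0 = PySem.List.pyGetD coord 0 0 then
          (acc2.1, acc2.2 ++ [PySem.List.slice coord (some 1) none]) else acc2) acc)
    (([] : List (List Int)), ([] : List (List Int)))
  acc.1.zip acc.2

-- ===== PORT B =====
-- Literal port of Source B: build the index dict over gates once, then one lookup per net endpoint.
def net_coordinates_alt (gates : List (List Int)) (nets : List (List Int)) : List (List Int × List Int) :=
  let index := gates.foldl (fun d g =>
      d.modify (PySem.List.pyGetD g 0 0) [] (· ++ [PySem.List.slice g (some 1) none]))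
    (PySem.Dict.empty : PySem.Dict Int (List (List Int)))
  let gate_coordinates_from := nets.foldl (fun acc conn => acc ++ index.getD (PySem.List.pyGetD conn 0 0) []) []
  let gate_coordinates_to := nets.foldl (fun acc conn => acc ++ index.getD (PySem.List.pyGetD conn 1 0) []) []
  gate_coordinates_from.zip gate_coordinates_to

-- ===== PRECONDITION & SPEC =====
-- Pre_ excludes inputs where A or B raises IndexError (empty gate rows or nets shorter than 2);
-- it additionally excludes the degenerate corners (empty gate row with nets = [], short net with gates = [])
-- where A trivially returns [] because its loops never touch the bad row but B's eager index/lookup raises IndexError.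
def Pre_net_coordinates (gates : List (List Int)) (nets : List (List Int)) : Prop :=
  (∀ g ∈ gates, 1 ≤ g.length) ∧ (∀ n ∈ nets, 2 ≤ n.length)
instance (gates : List (List Int)) (nets : List (List Int)) : Decidable (Pre_net_coordinates gates nets) := by unfold Pre_net_coordinates; infer_instance
def pvWitness_net_coordinates : List (List Int) × List (List Int) := ([[1, 0, 0], [2, 3, 4], [1, 5, 6]], [[1, 2], [2, 1]])
def Spec_net_coordinates (gates : List (List Int)) (nets : List (List Int)) (out : List (List Int × List Int)) : Prop := out = net_coordinates_alt gates nets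
instance (gates : List (List Int)) (nets : List (List Int)) (out : List (List Int × List Int)) : Decidable (Spec_net_coordinates gates nets out) := by unfold Spec_net_coordinates; infer_instance

-- ===== CLAIM (what is proved, stated in full; the proofs are below) =====
def Claim_equal_net_coordinates : Prop := ∀ (gates : List (List Int)) (nets : List (List Int)), Dom_net_coordinates gates nets → Pre_net_coordinates gates nets → Spec_net_coordinates gates nets (net_coordinates gates nets)

-- ===== LEMMAS AND PROOFS =====

-- the gate tails matching a given gate number, in gate order
def pvMatches (gates : List (List Int)) (k : Int) : List (List Int) :=
  (gates.filter (fun g => decide (k = PySem.List.pyGetD g 0 0))).map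
    (fun g => PySem.List.slice g (some 1) none)

theorem pv_index_getD (gates : List (List Int)) (d : PySem.Dict Int (List (List Int))) (k : Int) :
    (gates.foldl (fun d g =>
        d.modify (PySem.List.pyGetD g 0 0) [] (· ++ [PySem.List.slice g (some 1) none])) d).getD k []
      = d.getD k [] ++ pvMatches gates k := by
  induction gates generalizing d with
  | nil => simp [pvMatches]
  | cons g gs ih =>
    simp only [List.foldl_cons, ih, PySem.Dict.getD_modify]
    by_cases h : k = PySem.List.pyGetD g 0 0 <;>
      simp [h, pvMatches, List.append_assoc]

theorem pv_inner (gates : List (List Int)) (conn : List Int) (f t : List (List Int)) :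
    gates.foldl (fun acc2 coord =>
      let acc2 := if PySem.List.pyGetD conn 0 0 = PySem.List.pyGetD coord 0 0 then
          (acc2.1 ++ [PySem.List.slice coord (some 1) none], acc2.2) else acc2
      if PySem.List.pyGetD conn 1 0 = PySem.List.pyGetD coord 0 0 then
          (acc2.1, acc2.2 ++ [PySem.List.slice coord (some 1) none]) else acc2) (f, t)
      = (f ++ pvMatches gates (PySem.List.pyGetD conn 0 0),
         t ++ pvMatches gates (PySem.List.pyGetD conn 1 0)) := by
  induction gates generalizing f t with
  | nil => simp [pvMatches]
  | cons g gs ih =>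
    have hm : ∀ k, pvMatches (g :: gs) k =
        (if k = PySem.List.pyGetD g 0 0 then [PySem.List.slice g (some 1) none] else []) ++ pvMatches gs k := by
      intro k
      by_cases h : k = PySem.List.pyGetD g 0 0 <;> simp [pvMatches, h]
    by_cases h0 : PySem.List.pyGetD conn 0 0 = PySem.List.pyGetD g 0 0 <;>
      by_cases h1 : PySem.List.pyGetD conn 1 0 = PySem.List.pyGetD g 0 0
    · simp only [List.foldl_cons, if_pos h0, if_pos h1]
      rw [ih, hm, hm]
      simp [h0, h1, List.append_assoc]
    · simp only [List.foldl_cons, if_pos h0, if_neg h1]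
      rw [ih, hm, hm]
      simp [h0, h1, List.append_assoc]
    · simp only [List.foldl_cons, if_neg h0, if_pos h1]
      rw [ih, hm, hm]
      simp [h0, h1, List.append_assoc]
    · simp only [List.foldl_cons, if_neg h0, if_neg h1]
      rw [ih, hm, hm]
      simp [h0, h1]

theorem pv_outer (nets : List (List Int)) (F T : List Int → List (List Int)) (f t : List (List Int)) :
    nets.foldl (fun acc conn => (acc.1 ++ F conn, acc.2 ++ T conn)) (f, t)
      = (nets.foldl (fun a c => a ++ F c) f, nets.foldl (fun a c => a ++ T c) t) := by
  induction nets generalizing f t with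
  | nil => rfl
  | cons n ns ih => simp only [List.foldl_cons, ih]

-- ===== VERDICT (by name: the statement is the Claim_ definition above) =====
theorem net_coordinates_spec : Claim_equal_net_coordinates := by
  intro gates nets _ _
  unfold Spec_net_coordinates net_coordinates net_coordinates_alt
  have hidx : ∀ k, (gates.foldl (fun d g =>
      d.modify (PySem.List.pyGetD g 0 0) [] (· ++ [PySem.List.slice g (some 1) none]))
      (PySem.Dict.empty : PySem.Dict Int (List (List Int)))).getD k [] = pvMatches gates k := by
    intro k; rw [pv_index_getD]; simp
  simp only [hidx]
  have hin : (fun (acc : List (List Int) × List (List Int)) conn =>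
      gates.foldl (fun acc2 coord =>
        let acc2 := if PySem.List.pyGetD conn 0 0 = PySem.List.pyGetD coord 0 0 then
            (acc2.1 ++ [PySem.List.slice coord (some 1) none], acc2.2) else acc2
        if PySem.List.pyGetD conn 1 0 = PySem.List.pyGetD coord 0 0 then
            (acc2.1, acc2.2 ++ [PySem.List.slice coord (some 1) none]) else acc2) acc)
      = (fun (acc : List (List Int) × List (List Int)) conn =>
          (acc.1 ++ pvMatches gates (PySem.List.pyGetD conn 0 0),
           acc.2 ++ pvMatches gates (PySem.List.pyGetD conn 1 0))) := by
    funext acc conn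
    exact pv_inner gates conn acc.1 acc.2
  rw [hin, pv_outer]
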